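-- pv_equiv track=rewrite | github.com/efrenump/Rosalind | Problem01.py | SkewGCArray
-- ===== SOURCE A (Python) =====
-- def SkewGCArray(Genome):
--     SkewGC = 0
--     SkewValues = []
--     for i in range(0, len(Genome)):
--         if Genome[i] == "G":
--             SkewGC += 1
--         elif Genome[i] == "C":
--             SkewGC -= 1
--         SkewValues.append(SkewGC)
--     return SkewValues
-- ===== SOURCE B (Python) =====
-- def SkewGCArray(Genome):
--     # Divide and conquer: skew of a concatenation is the skew of the left part
--     # followed by the right part's skew shifted by the left part's final value.
--     def delta(c):
--         return 1 if c == "G" else -1 if c == "C" else 0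
--
--     def solve(seg):
--         if len(seg) <= 1:
--             return [delta(c) for c in seg]
--         m = len(seg) // 2
--         L = solve(seg[:m])
--         R = solve(seg[m:])
--         off = L[-1]
--         return L + [off + x for x in R]
--
--     return solve(Genome)
-- ===== Notes on version B (the rewrite author's own statement) =====
-- stated objective: alternative
-- what changed: Replaced the single-pass running-accumulator loop by a divide-and-conquer recursion that computes the skew array of each half independently and merges by offsetting the right half with the left half's final value.
import Mathlib
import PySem

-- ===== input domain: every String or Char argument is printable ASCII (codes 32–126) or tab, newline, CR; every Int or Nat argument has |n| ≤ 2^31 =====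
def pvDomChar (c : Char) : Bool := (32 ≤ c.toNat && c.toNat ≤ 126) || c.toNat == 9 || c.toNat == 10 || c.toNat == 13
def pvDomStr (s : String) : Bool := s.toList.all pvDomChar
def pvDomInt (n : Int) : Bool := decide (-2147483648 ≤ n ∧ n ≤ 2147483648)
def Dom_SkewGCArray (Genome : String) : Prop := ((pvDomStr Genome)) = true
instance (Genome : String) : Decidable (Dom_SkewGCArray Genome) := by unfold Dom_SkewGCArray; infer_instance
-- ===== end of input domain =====

-- B replaces A's single-pass running-accumulator loop by a divide-and-conquer
-- recursion on halves, merging with an offset; objective: alternative algorithm.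


-- ===== PORT A =====
-- for i in range(0, len(Genome)): state (SkewGC, SkewValues); Genome[i] is in range, so pyGetD is exact
def SkewGCArray (Genome : String) : List Int :=
  let cs := Genome.toList
  let st := (PySem.List.pyRange 0 (cs.length : Int) 1).foldl
    (fun (st : Int × List Int) i =>
      let c := PySem.List.pyGetD cs i ' '
      let s := if c = 'G' then st.1 + 1 else if c = 'C' then st.1 - 1 else st.1
      (s, st.2 ++ [s])) (0, [])
  st.2

-- ===== PORT B =====
def skewDelta (c : Char) : Int := if c = 'G' then 1 else if c = 'C' then -1 else 0

-- solve(seg): divide and conquer; structural recursion on a fuel that starts at the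
-- length (a totality guard only: each recursive call is on a strictly shorter segment);
-- seg[-1] is L.getLast! (L is always nonempty there, so this is exact where Python's
-- seg[-1] is reached)
def dcSolve (fuel : Nat) (cs : List Char) : List Int :=
  match fuel with
  | 0 => cs.map skewDelta
  | fuel + 1 =>
    if cs.length ≤ 1 then cs.map skewDelta
    else
      let m := cs.length / 2
      let L := dcSolve fuel (cs.take m)
      let R := dcSolve fuel (cs.drop m)
      let off := L.getLast!
      L ++ R.map (fun x => off + x)

def SkewGCArray_alt (Genome : String) : List Int :=
  dcSolve Genome.toList.length Genome.toList

-- ===== PRECONDITION & SPEC =====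
def Spec_SkewGCArray (Genome : String) (out : List Int) : Prop := out = SkewGCArray_alt Genome
instance (Genome : String) (out : List Int) : Decidable (Spec_SkewGCArray Genome out) := by unfold Spec_SkewGCArray; infer_instance

-- ===== CLAIM =====
def Claim_equal_SkewGCArray : Prop := ∀ (Genome : String), Dom_SkewGCArray Genome → Spec_SkewGCArray Genome (SkewGCArray Genome)

-- ===== LEMMAS AND PROOFS =====

-- running prefix sums, the common characterisation of both programs
def preSums : Int → List Int → List Int
  | _, [] => []
  | s, d :: ds => (s + d) :: preSums (s + d) ds

-- A's loop, rephrased as a structural fold over the characters, produces acc ++ preSums s deltas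
theorem skew_foldl_eq (cs : List Char) (s : Int) (acc : List Int) :
    (cs.foldl (fun (st : Int × List Int) c =>
        let v := if c = 'G' then st.1 + 1 else if c = 'C' then st.1 - 1 else st.1
        (v, st.2 ++ [v])) (s, acc)).2
      = acc ++ preSums s (cs.map skewDelta) := by
  induction cs generalizing s acc with
  | nil => simp [preSums]
  | cons c cs ih =>
    simp only [List.foldl_cons, List.map_cons, preSums]
    rw [ih]
    have : (if c = 'G' then s + 1 else if c = 'C' then s - 1 else s) = s + skewDelta c := by
      unfold skewDelta; split_ifs <;> omega
    rw [this]
    simp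

theorem preSums_shift (ds : List Int) (s : Int) :
    preSums s ds = (preSums 0 ds).map (fun x => s + x) := by
  induction ds generalizing s with
  | nil => simp [preSums]
  | cons d ds ih =>
    simp only [preSums, List.map_cons]
    rw [ih (s + d), ih (0 + d), List.map_map]
    congr 1
    · omega
    · exact List.map_congr_left (fun x _ => by simp [Function.comp]; omega)

theorem preSums_append (xs ys : List Int) (s : Int) :
    preSums s (xs ++ ys) = preSums s xs ++ preSums (s + xs.sum) ys := by
  induction xs generalizing s with
  | nil => simp [preSums]
  | cons x xs ih =>
    simp only [List.cons_append, preSums, List.sum_cons]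
    rw [ih (s + x), show s + x + xs.sum = s + (x + xs.sum) by ring]

theorem getLast!_cons_of_ne_nil' (x : Int) (l : List Int) (h : l ≠ []) :
    (x :: l).getLast! = l.getLast! := by
  cases l with
  | nil => exact absurd rfl h
  | cons y l => simp [List.getLast!, List.getLast]

theorem preSums_getLast! (d : Int) (ds : List Int) (s : Int) :
    (preSums s (d :: ds)).getLast! = s + (d :: ds).sum := by
  induction ds generalizing s d with
  | nil => simp [preSums]
  | cons e es ih =>
    show ((s + d) :: preSums (s + d) (e :: es)).getLast! = _
    rw [getLast!_cons_of_ne_nil' _ _ (by simp [preSums])]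
    rw [ih e (s + d)]
    simp [List.sum_cons]; ring

-- B's divide-and-conquer equals the prefix sums of the deltas (fuel suffices)
theorem dcSolve_eq (fuel : Nat) (cs : List Char) (hf : cs.length ≤ fuel) :
    dcSolve fuel cs = preSums 0 (cs.map skewDelta) := by
  induction fuel generalizing cs with
  | zero =>
    match cs, hf with
    | [], _ => simp [dcSolve, preSums]
  | succ fuel ih =>
    rw [dcSolve]
    by_cases h : cs.length ≤ 1
    · simp only [h, if_pos]
      match cs, h with
      | [], _ => simp [preSums]
      | [c], _ => simp [preSums]
    · simp only [h, if_neg, not_false_iff]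
      have hm1 : 1 ≤ cs.length / 2 := by omega
      have hmlt : cs.length / 2 < cs.length := by omega
      have ihL := ih (cs.take (cs.length / 2)) (by simp [List.length_take]; omega)
      have ihR := ih (cs.drop (cs.length / 2)) (by simp [List.length_drop]; omega)
      obtain ⟨d, ds, hds⟩ : ∃ d ds,
          (cs.take (cs.length / 2)).map skewDelta = d :: ds := by
        have : (cs.take (cs.length / 2)).map skewDelta ≠ [] := by
          intro hc
          have hlen := congrArg List.length hc
          rw [List.length_map, List.length_take, List.length_nil] at hlen
          omega
        exact List.exists_cons_of_ne_nil this
      have hoff : (preSums 0 ((cs.take (cs.length / 2)).map skewDelta)).getLast!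
          = ((cs.take (cs.length / 2)).map skewDelta).sum := by
        rw [hds, preSums_getLast!]; ring
      show dcSolve fuel (cs.take (cs.length / 2)) ++
          (dcSolve fuel (cs.drop (cs.length / 2))).map
            (fun x => (dcSolve fuel (cs.take (cs.length / 2))).getLast! + x) = _
      rw [ihL, ihR, hoff]
      have hsplit : cs.map skewDelta
          = (cs.take (cs.length / 2)).map skewDelta
            ++ (cs.drop (cs.length / 2)).map skewDelta := by
        rw [← List.map_append, List.take_append_drop]
      rw [hsplit, preSums_append, preSums_shift ((cs.drop (cs.length / 2)).map skewDelta)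
            (0 + ((cs.take (cs.length / 2)).map skewDelta).sum)]
      simp

-- ===== VERDICT =====
theorem SkewGCArray_spec : Claim_equal_SkewGCArray := by
  intro Genome _
  unfold Spec_SkewGCArray SkewGCArray SkewGCArray_alt
  dsimp only
  rw [PySem.List.foldl_pyRange_zero_pyGetD' Genome.toList ' '
        (fun (st : Int × List Int) c =>
          let v := if c = 'G' then st.1 + 1 else if c = 'C' then st.1 - 1 else st.1
          (v, st.2 ++ [v])) (0, [])]
  rw [skew_foldl_eq Genome.toList 0 [], dcSolve_eq Genome.toList.length Genome.toList le_rfl]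
  simp
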